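-- pv_equiv track=rewrite | github.com/kamaraj1226/leetcode_challanges | completed/1550_Three_Consecutive_Odds.py | solution
-- ===== SOURCE A (Python) =====
-- def solution(arr):
--     N = len(arr)
--     if N < 3:
--         return False
--
--     if N == 3:
--         return sum(arr) & 1
--
--     i = 0
--     while i < N - 3:
--         if sum(arr[i : i + 3]) & 1:
--             return True
--         i += 1
--
--     return False
-- ===== SOURCE B (Python) =====
-- def solution(arr):
--     N = len(arr)
--     if N < 3:
--         return False
--
--     if N == 3:
--         return sum(arr) & 1
--
--     p = [0]
--     for x in arr:
--         p.append(p[-1] ^ (x & 1))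
--
--     for i in range(N - 3):
--         if p[i + 3] ^ p[i]:
--             return True
--
--     return False
-- ===== Notes on version B (the rewrite author's own statement) =====
-- stated objective: alternative
-- what changed: Replaces per-window re-summing (sum(arr[i:i+3]) for each i) by a precomputed prefix-parity table built in one pass, with a second pass testing each window as an xor of two table entries; the early guards and the exact range(N-3) bound (which skips the final window, as A does) are kept. Pre_ excludes three-element lists, on which A returns the int sum(arr)&1 instead of a bool (B matches it there anyway).
-- outside the precondition, e.g. on solution([1, 2, 3]): A returns 0, B returns 0; on solution([1, 2, 4]): A returns 1, B returns 1
import Mathlib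
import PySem

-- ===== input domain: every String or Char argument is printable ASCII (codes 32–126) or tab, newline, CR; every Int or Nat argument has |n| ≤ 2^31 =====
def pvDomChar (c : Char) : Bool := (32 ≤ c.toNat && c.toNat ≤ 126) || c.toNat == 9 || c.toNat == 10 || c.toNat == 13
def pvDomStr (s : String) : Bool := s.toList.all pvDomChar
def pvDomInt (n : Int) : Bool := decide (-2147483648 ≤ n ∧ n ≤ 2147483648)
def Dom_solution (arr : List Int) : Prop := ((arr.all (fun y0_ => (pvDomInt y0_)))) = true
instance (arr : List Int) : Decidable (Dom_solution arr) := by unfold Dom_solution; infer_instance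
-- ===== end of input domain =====

-- B replaces per-window re-summing by a one-pass prefix-parity table plus a second pass
-- xoring two table entries per window (same cost class; a different algorithm, not faster).


-- ===== PORT A =====
-- Python's N == 3 branch returns the int sum(arr) & 1; as a Bool that is its truthiness.
def solution (arr : List Int) : Bool :=
  let N : Int := arr.length
  if N < 3 then false
  else if N = 3 then PySem.Int.band arr.sum 1 != 0
  else
    -- while i < N - 3 with early 'return True' = any over range(N-3)
    (PySem.List.pyRange 0 (N - 3) 1).any
      (fun i => PySem.Int.band (PySem.List.slice arr (some i) (some (i + 3))).sum 1 != 0)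

-- ===== PORT B =====
def solution_alt (arr : List Int) : Bool :=
  let N : Int := arr.length
  if N < 3 then false
  else if N = 3 then PySem.Int.band arr.sum 1 != 0
  else
    -- p = [0]; for x in arr: p.append(p[-1] ^ (x & 1))
    let p : List Int := arr.foldl
      (fun acc x => acc ++ [PySem.Int.bxor (PySem.List.pyGetD acc (-1) 0) (PySem.Int.band x 1)]) [0]
    (PySem.List.pyRange 0 (N - 3) 1).any
      (fun i => PySem.Int.bxor (PySem.List.pyGetD p (i + 3) 0) (PySem.List.pyGetD p i 0) != 0)

-- ===== PRECONDITION & SPEC =====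
-- Pre_ excludes exactly the three-element lists, on which Python A (and B) returns the int
-- sum(arr) & 1 rather than a bool — a value outside the declared return type.
def Pre_solution (arr : List Int) : Prop := arr.length ≠ 3
instance (arr : List Int) : Decidable (Pre_solution arr) := by unfold Pre_solution; infer_instance
def pvWitness_solution : List Int := [1, 2, 3, 4, 5]
def Spec_solution (arr : List Int) (out : Bool) : Prop := out = solution_alt arr
instance (arr : List Int) (out : Bool) : Decidable (Spec_solution arr out) := by unfold Spec_solution; infer_instance

-- ===== CLAIM (what is proved, stated in full; the proofs are below) =====
def Claim_equal_solution : Prop := ∀ (arr : List Int), Dom_solution arr → Pre_solution arr → Spec_solution arr (solution arr)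

-- ===== LEMMAS AND PROOFS =====

-- the parity step of B's table
def pvG (s x : Int) : Int := PySem.Int.bxor s (PySem.Int.band x 1)

lemma pvBxor00 : PySem.Int.bxor (0:Int) 0 = 0 := by decide
lemma pvBxor01 : PySem.Int.bxor (0:Int) 1 = 1 := by decide
lemma pvBxor10 : PySem.Int.bxor (1:Int) 0 = 1 := by decide
lemma pvBxor11 : PySem.Int.bxor (1:Int) 1 = 0 := by decide

lemma pvG_eq (s x : Int) (hs : s = 0 ∨ s = 1) : pvG s x = (s + x) % 2 := by
  unfold pvG
  rw [PySem.Int.band_one, PySem.Int.mod_eq_emod_of_pos (by norm_num)]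
  rcases hs with rfl | rfl <;> rcases Int.emod_two_eq x with h | h <;> rw [h] <;>
    simp only [pvBxor00, pvBxor01, pvBxor10, pvBxor11] <;> omega

lemma pvG_bit (s x : Int) (hs : s = 0 ∨ s = 1) : pvG s x = 0 ∨ pvG s x = 1 := by
  rw [pvG_eq s x hs]; omega

-- B's append loop builds exactly the scanl of pvG
lemma pvFoldl_scanl (l : List Int) : ∀ (acc : List Int) (h : acc ≠ []),
    l.foldl (fun acc x => acc ++ [PySem.Int.bxor (PySem.List.pyGetD acc (-1) 0) (PySem.Int.band x 1)]) acc
      = acc.dropLast ++ List.scanl pvG (acc.getLast h) l := by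
  induction l with
  | nil =>
      intro acc h
      simp [List.scanl_nil, List.dropLast_append_getLast h]
  | cons x l ih =>
      intro acc h
      have hstep :
          acc ++ [PySem.Int.bxor (PySem.List.pyGetD acc (-1) 0) (PySem.Int.band x 1)]
            = acc ++ [pvG (acc.getLast h) x] := by
        rw [PySem.List.pyGetD_neg_one acc 0 h]; rfl
      simp only [List.foldl_cons, hstep]
      rw [ih (acc ++ [pvG (acc.getLast h) x]) (by simp)]
      rw [List.scanl_cons, List.getLast_append_singleton, List.dropLast_concat,
          List.append_cons, List.dropLast_append_getLast h]

-- value of the k-th entry of the scanl: parity of the first k elements (shifted by s)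
lemma pvScanl_getD (l : List Int) : ∀ (k : Nat) (s : Int), s = 0 ∨ s = 1 → k ≤ l.length →
    (List.scanl pvG s l).getD k 0 = (s + (l.take k).sum) % 2 := by
  induction l with
  | nil =>
      intro k s hs hk
      have hk0 : k = 0 := by simpa using hk
      subst hk0
      simp [List.scanl_nil]
      omega
  | cons x l ih =>
      intro k s hs hk
      cases k with
      | zero => simp [List.scanl_cons]; omega
      | succ k =>
          rw [List.scanl_cons]
          simp only [List.getD_cons_succ, List.take_succ_cons, List.sum_cons]
          rw [ih k (pvG s x) (pvG_bit s x hs) (by simpa using hk), pvG_eq s x hs]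
          omega

lemma pvNe_congr (a b : Int) (h : a ≠ 0 ↔ b ≠ 0) : (a != 0) = (b != 0) := by
  by_cases ha : a = 0
  · have hb : b = 0 := by by_contra hb; exact (h.mpr hb) ha
    simp [ha, hb]
  · have hb : b ≠ 0 := h.mp ha
    rw [show (a != 0) = true by simp [ha], show (b != 0) = true by simp [hb]]

lemma pvBxor_parity (S W : Int) :
    PySem.Int.bxor ((S + W) % 2) (S % 2) ≠ 0 ↔ W % 2 ≠ 0 := by
  have h1 : (S + W) % 2 = 0 ∨ (S + W) % 2 = 1 := by omega
  have h2 : S % 2 = 0 ∨ S % 2 = 1 := by omega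
  rcases h1 with h1 | h1 <;> rcases h2 with h2 | h2 <;> rw [h1, h2] <;>
    simp only [pvBxor00, pvBxor01, pvBxor10, pvBxor11] <;> omega

-- ===== VERDICT (by name: the statement is the Claim_ definition above) =====
theorem solution_spec : Claim_equal_solution := by
  intro arr _ hpre
  unfold Pre_solution at hpre
  unfold Spec_solution solution solution_alt
  by_cases h3 : (arr.length : Int) < 3
  · simp [h3]
  · have he : ¬ ((arr.length : Int) = 3) := by omega
    simp only [if_neg h3, if_neg he]
    have hp : arr.foldl
        (fun acc x => acc ++ [PySem.Int.bxor (PySem.List.pyGetD acc (-1) 0) (PySem.Int.band x 1)]) [0]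
          = List.scanl pvG 0 arr := by
      rw [pvFoldl_scanl arr [0] (by simp)]
      rfl
    rw [hp]
    apply PySem.List.any_congr_mem
    intro i hi
    rw [PySem.List.mem_pyRange_one] at hi
    obtain ⟨hi0, hiN⟩ := hi
    set j : Nat := i.toNat with hj
    have hij : i = (j : Int) := by omega
    have hjlen : j + 3 ≤ arr.length := by omega
    have h3cast : ((j : Int) + 3) = ((j + 3 : Nat) : Int) := by push_cast; ring
    have e1 : PySem.List.pyGetD (List.scanl pvG 0 arr) (i + 3) 0
        = ((arr.take (j + 3)).sum) % 2 := by
      rw [hij, h3cast, PySem.List.pyGetD_natCast,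
          pvScanl_getD arr (j + 3) 0 (Or.inl rfl) hjlen]
      omega
    have e0 : PySem.List.pyGetD (List.scanl pvG 0 arr) i 0
        = ((arr.take j).sum) % 2 := by
      rw [hij, PySem.List.pyGetD_natCast,
          pvScanl_getD arr j 0 (Or.inl rfl) (by omega)]
      omega
    have hw : PySem.List.slice arr (some i) (some (i + 3))
        = (arr.drop j).take 3 := by
      rw [hij]
      exact_mod_cast PySem.List.slice_natCast_add (xs := arr) (j := j) (n := 3)
    have hsplit : (arr.take (j + 3)).sum
        = (arr.take j).sum + ((arr.drop j).take 3).sum := by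
      rw [List.take_add]; simp
    rw [e1, e0, hw, hsplit, PySem.Int.band_one,
        PySem.Int.mod_eq_emod_of_pos (by norm_num)]
    exact pvNe_congr _ _ (pvBxor_parity (arr.take j).sum ((arr.drop j).take 3).sum).symm
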